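-- pv_equiv track=rewrite | github.com/mumble-voip/mumble | scripts/generate-cipherinfo.py | integerFromIdent
-- ===== SOURCE A (Python) =====
-- def integerFromIdent(ident):
-- 	'''
-- 		Parses a TLS cipher suite identifier from the IETF TLS cipher suite registry.
-- 		The cipher suite identifier is represented as a string of hex-encoded byte values
-- 		separated by commas.
--
-- 		This function consumes the byte sequence and converts it into an unsigned integer.
-- 	'''
-- 	hexVals = ident.split(',')
-- 	nbytes = len(hexVals)
-- 	if nbytes > 3:
-- 		raise Exception("unexpected amount of bytes")
-- 	outVal = 0
-- 	for idx, val in enumerate(hexVals):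
-- 		intVal = int(val, base=16)
-- 		outVal |= ((intVal & 0xff) << (((nbytes - 1) - idx) * 8))
-- 	return outVal
-- ===== SOURCE B (Python) =====
-- def integerFromIdent(ident):
--     hexVals = ident.split(',')
--     if len(hexVals) > 3:
--         raise Exception("unexpected amount of bytes")
--     buf = bytes(int(v, 16) & 0xff for v in hexVals)
--     return int.from_bytes(buf, 'big')
-- ===== Notes on version B (the rewrite author's own statement) =====
-- stated objective: idiomatic
-- what changed: B replaces the explicit positional shift/OR accumulator with building a concrete big-endian byte buffer of the masked values and decoding it in one step with int.from_bytes.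
import Mathlib
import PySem

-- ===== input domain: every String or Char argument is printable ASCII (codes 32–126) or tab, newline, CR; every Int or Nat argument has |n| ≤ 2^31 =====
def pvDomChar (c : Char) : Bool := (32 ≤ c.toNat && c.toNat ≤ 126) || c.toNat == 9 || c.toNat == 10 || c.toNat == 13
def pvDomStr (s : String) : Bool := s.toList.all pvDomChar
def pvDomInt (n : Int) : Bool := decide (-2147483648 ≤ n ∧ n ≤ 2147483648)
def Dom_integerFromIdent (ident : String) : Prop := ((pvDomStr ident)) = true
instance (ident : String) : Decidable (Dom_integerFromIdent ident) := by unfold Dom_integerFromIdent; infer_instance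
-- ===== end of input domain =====

-- B builds a big-endian byte buffer and decodes it with one int.from_bytes instead of A's shift/OR accumulator; same cost, more idiomatic.

-- ===== PORT A =====
-- literal port of A; `int(val, 16)` = PySem.Int.ofStrBase?; inputs where Python raises
-- (more than 3 tokens, or a token int() rejects) are excluded by Pre_, `.getD` there is arbitrary.
def integerFromIdent (ident : String) : Int :=
  let hexVals := (PySem.Str.split? ident ",").getD []   -- sep "," ≠ "" so split? is always some
  let nbytes : Int := PySem.List.len hexVals
  if 3 < nbytes then 0    -- Python raises Exception here (outside Pre_)
  else
    (PySem.List.enumerate hexVals).foldl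
      (fun outVal iv =>
        let intVal := (PySem.Int.ofStrBase? iv.2 16).getD 0
        -- shift amount ((nbytes-1)-idx)*8 is ≥ 0 for every loop index, so .toNat is exact
        PySem.Int.bor outVal ((PySem.Int.band intVal 255) <<< ((((nbytes - 1) - iv.1) * 8).toNat)))
      0

-- ===== PORT B =====
-- literal port of Source B; the bytes buffer is the list of masked values and
-- int.from_bytes(buf,'big') is the big-endian fold acc*256 + b.
def integerFromIdent_alt (ident : String) : Int :=
  let hexVals := (PySem.Str.split? ident ",").getD []
  if 3 < (PySem.List.len hexVals) then 0    -- Python raises Exception here (outside Pre_)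
  else
    let buf := hexVals.map (fun v => PySem.Int.band ((PySem.Int.ofStrBase? v 16).getD 0) 255)
    buf.foldl (fun acc b => acc * 256 + b) 0

-- ===== PRECONDITION & SPEC =====
-- Pre_ = exactly the inputs where A returns: at most 3 comma-separated tokens, each accepted by int(·, 16).
def Pre_integerFromIdent (ident : String) : Prop :=
  let t := (PySem.Str.split? ident ",").getD []
  t.length ≤ 3 ∧ ∀ v ∈ t, (PySem.Int.ofStrBase? v 16).isSome = true

instance (ident : String) : Decidable (Pre_integerFromIdent ident) := by
  unfold Pre_integerFromIdent; infer_instance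

def pvWitness_integerFromIdent : String := "c0,2f"

def Spec_integerFromIdent (ident : String) (out : Int) : Prop := out = integerFromIdent_alt ident
instance (ident : String) (out : Int) : Decidable (Spec_integerFromIdent ident out) := by unfold Spec_integerFromIdent; infer_instance

-- ===== CLAIM (what is proved, stated in full; the proofs are below) =====
def Claim_equal_integerFromIdent : Prop := ∀ (ident : String), Dom_integerFromIdent ident → Pre_integerFromIdent ident → Spec_integerFromIdent ident (integerFromIdent ident)

-- ===== LEMMAS AND PROOFS =====

theorem pv_lor_disjoint (a b n : Nat) (h : b < 2^n) : 2^n * a ||| b = 2^n * a + b := by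
  apply Nat.eq_of_testBit_eq
  intro j
  rw [Nat.testBit_lor, Nat.testBit_two_pow_mul_add a h j]
  have h0 : (2^n * a).testBit j = if j < n then false else a.testBit (j - n) := by
    simpa using Nat.testBit_two_pow_mul_add a (b := 0) (Nat.two_pow_pos n) j
  rw [h0]
  by_cases hj : j < n
  · simp [hj]
  · simp [hj, Nat.testBit_eq_false_of_lt
      (Nat.lt_of_lt_of_le h (Nat.pow_le_pow_right (by norm_num) (Nat.le_of_not_lt hj)))]

-- `v & 0xff` is a byte: some natural number below 256
theorem pv_band255 (v : Int) : ∃ a : Nat, a < 256 ∧ PySem.Int.band v 255 = (a : Int) := by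
  unfold PySem.Int.band
  by_cases h : 0 ≤ v
  · refine ⟨v.toNat &&& (255:Int).toNat, ?_, by simp [h]⟩
    have := Nat.and_le_right (n := v.toNat) (m := (255:Int).toNat)
    norm_num at this ⊢; omega
  · refine ⟨(255:Int).toNat - ((255:Int).toNat &&& (-v - 1).toNat), ?_, by simp [h]⟩
    norm_num; omega

theorem pv_shift_cast (n k : Nat) : ((n : Int) <<< k) = ((n <<< k : Nat) : Int) := by
  simp [Int.shiftLeft_eq, Nat.shiftLeft_eq]

-- ===== VERDICT (by name: the statement is the Claim_ definition above) =====
set_option maxRecDepth 4096 in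
theorem integerFromIdent_spec : Claim_equal_integerFromIdent := by
  intro ident _ hpre
  unfold Spec_integerFromIdent integerFromIdent integerFromIdent_alt
  obtain ⟨hlen, _⟩ := hpre
  set t := (PySem.Str.split? ident ",").getD [] with ht
  clear_value t
  match t, hlen with
  | [], _ => simp [PySem.List.enumerate, PySem.List.len]
  | [x], _ =>
      simp only [PySem.List.enumerate, List.foldl, List.map, PySem.List.len, List.length]
      obtain ⟨a1, h1, e1⟩ := pv_band255 ((PySem.Int.ofStrBase? x 16).getD 0)
      rw [e1]
      norm_num [PySem.Int.bor_comm, PySem.Int.bor_zero]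
  | [x, y], _ =>
      simp only [PySem.List.enumerate, List.foldl, List.map, PySem.List.len, List.length]
      obtain ⟨a1, h1, e1⟩ := pv_band255 ((PySem.Int.ofStrBase? x 16).getD 0)
      obtain ⟨a2, h2, e2⟩ := pv_band255 ((PySem.Int.ofStrBase? y 16).getD 0)
      rw [e1, e2]
      norm_num
      rw [pv_shift_cast, show Int.toNat 8 = 8 from rfl,
        show (0:Int) = ((0:Nat):Int) from rfl, PySem.Int.bor_natCast, PySem.Int.bor_natCast]
      have key : (0 ||| a1 <<< 8) ||| a2 = 2^8 * a1 + a2 := by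
        rw [Nat.zero_or, Nat.shiftLeft_eq, Nat.mul_comm]
        exact pv_lor_disjoint a1 a2 8 (by omega)
      rw [key]; push_cast; ring
  | [x, y, z], _ =>
      simp only [PySem.List.enumerate, List.foldl, List.map, PySem.List.len, List.length]
      obtain ⟨a1, h1, e1⟩ := pv_band255 ((PySem.Int.ofStrBase? x 16).getD 0)
      obtain ⟨a2, h2, e2⟩ := pv_band255 ((PySem.Int.ofStrBase? y 16).getD 0)
      obtain ⟨a3, h3, e3⟩ := pv_band255 ((PySem.Int.ofStrBase? z 16).getD 0)
      rw [e1, e2, e3]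
      norm_num
      rw [pv_shift_cast, pv_shift_cast, show Int.toNat 16 = 16 from rfl, show Int.toNat 8 = 8 from rfl,
        show (0:Int) = ((0:Nat):Int) from rfl, PySem.Int.bor_natCast, PySem.Int.bor_natCast, PySem.Int.bor_natCast]
      have s1 : (0 ||| a1 <<< 16) ||| a2 <<< 8 = 2^8 * (2^8 * a1 + a2) := by
        rw [Nat.zero_or, Nat.shiftLeft_eq, Nat.shiftLeft_eq, Nat.mul_comm a1]
        rw [pv_lor_disjoint a1 (a2 * 2^8) 16 (by omega)]
        ring
      have s2 : 2^8 * (2^8 * a1 + a2) ||| a3 = 2^8 * (2^8 * a1 + a2) + a3 :=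
        pv_lor_disjoint _ a3 8 (by omega)
      rw [s1, s2]; push_cast; ring
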